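-- pv_equiv track=rewrite | github.com/joagonzalez/ditella-tecnicas-algoritmicas | ejercicios/dinamica/ej2.py | cant_sumas_distintas_exp
-- ===== SOURCE A (Python) =====
-- def cant_sumas_distintas_exp(n):
--     if n == 1:
--         rv = 1
--     # hay 1 forma de escribir 1: (1)
--     elif n == 2:
--         rv = 1
--     # hay 1 forma de escribir 2: (1+1)
--     elif n == 3:
--         rv = 2
--     # hay 2 formas de escribir 3: (1+1+1),(3)
--     elif n == 4:
--         rv = 4
--     # hay 4 formas de escribir 4: (1+1+1+1),(1+3),(3+1),(4)
--     else:
--         rv = cant_sumas_distintas_exp(n-1) + \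
--              cant_sumas_distintas_exp(n-3) + \
--              cant_sumas_distintas_exp(n-4)
--     return rv
-- ===== SOURCE B (Python) =====
-- def cant_sumas_distintas_exp(n):
--     a, b, c, d = 1, 1, 2, 4
--     for _ in range(n - 1):
--         a, b, c, d = b, c, d, a + b + d
--     return a
-- ===== Notes on version B (the rewrite author's own statement) =====
-- stated objective: faster
-- what changed: Replaces the exponential four-branch recursion with a bottom-up loop that keeps only the last four sequence values; intended as faster (asymptotic): in a timing run A timed out at small sizes where B still returned, and B was over 10x faster at the largest size both finished.
-- outside the precondition, e.g. on cant_sumas_distintas_exp(0): A raises RecursionError, B returns 1; on cant_sumas_distintas_exp(-3): A raises RecursionError, B returns 1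
import Mathlib
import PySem

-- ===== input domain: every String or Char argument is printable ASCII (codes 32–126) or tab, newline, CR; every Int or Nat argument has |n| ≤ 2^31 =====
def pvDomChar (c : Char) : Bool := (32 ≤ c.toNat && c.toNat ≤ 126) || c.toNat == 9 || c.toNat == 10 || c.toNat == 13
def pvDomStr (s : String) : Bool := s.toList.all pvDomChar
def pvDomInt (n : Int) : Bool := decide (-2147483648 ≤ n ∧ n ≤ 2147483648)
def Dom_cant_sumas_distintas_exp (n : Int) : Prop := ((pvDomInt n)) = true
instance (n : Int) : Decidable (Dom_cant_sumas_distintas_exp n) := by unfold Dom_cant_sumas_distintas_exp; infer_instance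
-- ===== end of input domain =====

-- B replaces A's four-branch recursion with a bottom-up loop over the last four values (intended as faster; in a timing run A timed out at small sizes where B still returned).
-- Pre_ excludes n <= 0, e.g. n = 0, where A recurses without a base case and raises RecursionError (B returns 1 there).


-- ===== PORT A =====
-- A's recursion, on the Nat value of n (A only returns for n ≥ 1; for n ≤ 0 it
-- diverges into RecursionError, excluded by Pre_; the 0 case here is a filler).
def pvAAux : Nat → Int
  | 0 => 0
  | 1 => 1
  | 2 => 1
  | 3 => 2
  | 4 => 4
  | n + 5 => pvAAux (n + 4) + pvAAux (n + 2) + pvAAux (n + 1)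

def cant_sumas_distintas_exp (n : Int) : Int := pvAAux n.toNat

-- ===== PORT B =====
-- the loop body of Source B: k remaining iterations over state (a,b,c,d)
def pvBLoop : Nat → Int × Int × Int × Int → Int × Int × Int × Int
  | 0, s => s
  | k + 1, (a, b, c, d) => pvBLoop k (b, c, d, a + b + d)

def cant_sumas_distintas_exp_alt (n : Int) : Int :=
  (pvBLoop (n - 1).toNat (1, 1, 2, 4)).1

-- ===== PRECONDITION & SPEC =====
-- Pre_ excludes n ≤ 0: there A's else-branch recurses forever (RecursionError).
def Pre_cant_sumas_distintas_exp (n : Int) : Prop := 1 ≤ n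
instance (n : Int) : Decidable (Pre_cant_sumas_distintas_exp n) := by
  unfold Pre_cant_sumas_distintas_exp; infer_instance

def pvWitness_cant_sumas_distintas_exp : Int := (7)

def Spec_cant_sumas_distintas_exp (n : Int) (out : Int) : Prop := out = cant_sumas_distintas_exp_alt n
instance (n : Int) (out : Int) : Decidable (Spec_cant_sumas_distintas_exp n out) := by unfold Spec_cant_sumas_distintas_exp; infer_instance

-- ===== CLAIM (what is proved, stated in full; the proofs are below) =====
def Claim_equal_cant_sumas_distintas_exp : Prop := ∀ (n : Int), Dom_cant_sumas_distintas_exp n → Pre_cant_sumas_distintas_exp n → Spec_cant_sumas_distintas_exp n (cant_sumas_distintas_exp n)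

-- ===== LEMMAS AND PROOFS =====
-- B's loop, started on four consecutive values of A's sequence (from index j+1 ≥ 1),
-- lands on the value at index j+1+k.
theorem pvBLoop_fst (k : Nat) : ∀ j : Nat,
    (pvBLoop k (pvAAux (j+1), pvAAux (j+2), pvAAux (j+3), pvAAux (j+4))).1
      = pvAAux (j + 1 + k) := by
  induction k with
  | zero => intro j; rfl
  | succ k ih =>
    intro j
    have hrec : pvAAux (j+1) + pvAAux (j+2) + pvAAux (j+4) = pvAAux (j+5) := by
      show _ = pvAAux (j + 5)
      rw [pvAAux]
      ring
    show (pvBLoop k (pvAAux (j+2), pvAAux (j+3), pvAAux (j+4),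
            pvAAux (j+1) + pvAAux (j+2) + pvAAux (j+4))).1 = _
    rw [hrec]
    have := ih (j + 1)
    simpa [Nat.add_assoc, Nat.add_comm, Nat.add_left_comm] using this

-- ===== VERDICT (by name: the statement is the Claim_ definition above) =====
theorem cant_sumas_distintas_exp_spec : Claim_equal_cant_sumas_distintas_exp := by
  intro n _ hpre
  have hn : 1 ≤ n := hpre
  unfold Spec_cant_sumas_distintas_exp cant_sumas_distintas_exp cant_sumas_distintas_exp_alt
  have key := pvBLoop_fst (n - 1).toNat 0
  simp only [Nat.zero_add] at key
  have h4 : (pvAAux 1, pvAAux 2, pvAAux 3, pvAAux 4) = ((1:Int), (1:Int), (2:Int), (4:Int)) := by decide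
  rw [h4] at key
  rw [key]
  congr 1
  omega
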